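-- pv_equiv track=rewrite | github.com/engineering-friends/lessmore | source/python/services/stepwise/collect_indent_blocks.py | parse_indent_blocks
-- ===== SOURCE A (Python) =====
-- def parse_indent_blocks(code: str) -> list[tuple[int, int]]:
--     # - Return if text is empty
--
--     if code.strip() == "":
--         return []
--
--     # - Split text into lines
--
--     lines = ["SOF"] + ["    " + line for line in code.split("\n")] + ["EOF"]
--
--     # - Iterate over lines
--
--     indents_stack = [-1]  # stub value
--     start_line_number_stack = [-1]  # stub value
--
--     result = []
--
--     for i, line in enumerate(lines):
--         # - Find line indent
--
--         if line.strip() == "":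
--             indent = indents_stack[-1]  # just take the last indent
--         else:
--             indent = len(line) - len(line.strip())
--
--         # - Close or open the group
--
--         # -- If the indent is less than the last indent, close the upstream groups from the stack: add to the result and pop from the stack
--
--         if indent < indents_stack[-1]:
--             while indents_stack and indent < indents_stack[-1]:
--                 start_line = start_line_number_stack.pop()
--                 result.append((start_line - 1, i - 1))  # -1 because of the SOF line
--                 indents_stack.pop()
--
--         # -- If the indent is greater than the last indent, add a new group to the stack
--
--         if indent > indents_stack[-1]:
--             indents_stack.append(indent)
--             start_line_number_stack.append(i)
--
--         # -- Assert indent is equal to the last indent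
--
--         assert indent == indents_stack[-1]
--
--     # - Return the result: symbol ranges
--
--     # -- Init ranges list
--
--     ranges = []
--
--     # -- Calculate symbol positions for lines
--
--     lines = code.split("\n")
--     line_endings = [len(lines[0])]
--     for line in lines[1:]:
--         line_endings.append(line_endings[-1] + len(line) + 1)
--
--     # -- Calculate symbol ranges
--
--     for start_line, end_line in result:
--         ranges.append((line_endings[start_line - 1] + 1 if start_line != 0 else 0, line_endings[end_line - 1]))
--
--     # -- Return the result
--
--     return ranges
-- ===== SOURCE B (Python) =====
-- def parse_indent_blocks(code: str) -> list[tuple[int, int]]: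
--     # Recursive-descent re-implementation: per-line effective indents first,
--     # then a descent that emits each block post-order (children before parent),
--     # then the same prefix-sum character mapping.
--     if code.strip() == "":
--         return []
--
--     raw = ["SOF"] + ["    " + line for line in code.split("\n")] + ["EOF"]
--
--     # - Effective indent of every line (blank lines inherit the previous one)
--     d = []
--     prev = -1
--     for line in raw:
--         stripped = line.strip()
--         ind = prev if stripped == "" else len(line) - len(stripped)
--         d.append(ind)
--         prev = ind
--
--     # - Recursive descent: consume the body of the block at level `lvl`
--     #   starting at line i; returns (first line not in the block, emitted ranges)
--     def scan(lvl, i):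
--         out = []
--         while i < len(d) and d[i] >= lvl:
--             if d[i] > lvl:
--                 j, sub = scan(d[i], i + 1)
--                 out += sub + [(i - 1, j - 1)]  # block itself after its children
--                 i = j
--             else:
--                 i += 1
--         return i, out
--
--     _, blocks = scan(0, 1)  # line 0 is the SOF sentinel; its block is never emitted
--
--     # - Character positions of line endings (prefix sums)
--     lines = code.split("\n")
--     line_endings = [len(lines[0])]
--     for line in lines[1:]:
--         line_endings.append(line_endings[-1] + len(line) + 1)
--
--     # - Map line ranges to character ranges
--     ranges = []
--     for start_line, end_line in blocks:
--         ranges.append((line_endings[start_line - 1] + 1 if start_line != 0 else 0, line_endings[end_line - 1]))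
--     return ranges
-- ===== Notes on version B (the rewrite author's own statement) =====
-- stated objective: alternative
-- what changed: Replaced A's two parallel stacks driven by a single enumerate loop with a two-phase approach: a first pass precomputes every line's effective indent (blank lines inherit the previous one), then a recursive descent over that indent list consumes each block and emits its line range post-order (children before parent), reproducing A's innermost-closes-first order; the prefix-sum character mapping is kept.
import Mathlib
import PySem

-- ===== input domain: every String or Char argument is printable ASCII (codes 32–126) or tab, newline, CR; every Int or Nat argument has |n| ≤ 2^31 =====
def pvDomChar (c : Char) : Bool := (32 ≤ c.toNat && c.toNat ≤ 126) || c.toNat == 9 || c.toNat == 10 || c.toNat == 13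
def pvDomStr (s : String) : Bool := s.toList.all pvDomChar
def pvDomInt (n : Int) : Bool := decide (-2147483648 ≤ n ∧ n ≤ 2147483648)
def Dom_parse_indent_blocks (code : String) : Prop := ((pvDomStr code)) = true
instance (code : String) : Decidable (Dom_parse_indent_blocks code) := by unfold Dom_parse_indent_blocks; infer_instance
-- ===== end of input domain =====

-- B replaces A's two parallel stacks with precomputed per-line indents plus a
-- post-order recursive descent (objective: alternative decomposition, same cost).

-- ===== PORT A =====

-- the `while indents_stack and indent < indents_stack[-1]` pop loop (stacks with top at head)
def aPopWhile (indent i : Int) : List Int → List Int → List (Int × Int) → List Int × List Int × List (Int × Int)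
  | l :: L, s :: S, res =>
      if indent < l then aPopWhile indent i L S (res ++ [(s - 1, i - 1)])
      else (l :: L, s :: S, res)
  | L, S, res => (L, S, res)

-- one iteration of A's `for i, line in enumerate(lines)` body (the assert always holds and is dropped)
def aStep (i : Int) (line : List Char) (st : List Int × List Int × List (Int × Int)) :
    List Int × List Int × List (Int × Int) :=
  let indent := if PySem.Chars.strip line = [] then st.1.headD 0
                else PySem.Chars.len line - PySem.Chars.len (PySem.Chars.strip line)
  let st' := aPopWhile indent i st.1 st.2.1 st.2.2
  if indent > st'.1.headD 0 then (indent :: st'.1, i :: st'.2.1, st'.2.2) else st'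
  -- `indents_stack[-1]` read as headD 0: the stack is never empty (bottom sentinel -1)

def aLoop : Int → List (List Char) → (List Int × List Int × List (Int × Int)) → (List Int × List Int × List (Int × Int))
  | _, [], st => st
  | i, line :: rest, st => aLoop (i + 1) rest (aStep i line st)

-- `line_endings`: first entry len(lines[0]), then prefix sums (last carried explicitly)
def aEndLoop (acc : List Int) (last : Int) : List (List Char) → List Int
  | [] => acc
  | line :: rest => aEndLoop (acc ++ [last + PySem.Chars.len line + 1]) (last + PySem.Chars.len line + 1) rest

-- the final `for start_line, end_line in result` loop (indices are always in range)
def aRanges (le : List Int) : List (Int × Int) → List (Int × Int)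
  | [] => []
  | (s, e) :: rest =>
      (if s ≠ 0 then PySem.List.pyGetD le (s - 1) 0 + 1 else 0, PySem.List.pyGetD le (e - 1) 0) :: aRanges le rest

def parse_indent_blocks (code : String) : List (Int × Int) :=
  let cs := code.toList
  if PySem.Chars.strip cs = [] then []
  else
    let lines := ["SOF".toList] ++ (PySem.Chars.splitOn cs ['\n']).map (fun l => "    ".toList ++ l) ++ ["EOF".toList]
    let st := aLoop 0 lines ([-1], [-1], [])
    match PySem.Chars.splitOn cs ['\n'] with
    | [] => []  -- unreachable: split always returns at least one piece
    | first :: rest =>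
      aRanges (aEndLoop [PySem.Chars.len first] (PySem.Chars.len first) rest) st.2.2

-- ===== PORT B =====

-- phase 1: effective indent of a line, blank lines inherit `prev`
def bLineIndent (prev : Int) (line : List Char) : Int :=
  if PySem.Chars.strip line = [] then prev
  else PySem.Chars.len line - PySem.Chars.len (PySem.Chars.strip line)

def bIndents : Int → List (List Char) → List Int
  | _, [] => []
  | prev, line :: rest => bLineIndent prev line :: bIndents (bLineIndent prev line) rest

-- phase 2: recursive descent over the indent suffix at absolute position i;
-- returns (first position not in the block at level lvl, its ranges post-order)
def bScan (lvl i : Int) : List Int → Int × List (Int × Int)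
  | [] => (i, [])
  | x :: rest =>
    if x < lvl then (i, [])
    else if x > lvl then
      let r₁ := bScan x (i + 1) rest
      let r₂ := bScan lvl r₁.1 (rest.drop (r₁.1 - (i + 1)).toNat)
      (r₂.1, r₁.2 ++ [(i - 1, r₁.1 - 1)] ++ r₂.2)
    else bScan lvl (i + 1) rest
  termination_by ds => ds.length
  decreasing_by all_goals (simp [List.length_drop]; try omega)

def bEndLoop (acc : List Int) (last : Int) : List (List Char) → List Int
  | [] => acc
  | line :: rest => bEndLoop (acc ++ [last + PySem.Chars.len line + 1]) (last + PySem.Chars.len line + 1) rest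

def bRanges (le : List Int) : List (Int × Int) → List (Int × Int)
  | [] => []
  | (s, e) :: rest =>
      (if s ≠ 0 then PySem.List.pyGetD le (s - 1) 0 + 1 else 0, PySem.List.pyGetD le (e - 1) 0) :: bRanges le rest

def parse_indent_blocks_alt (code : String) : List (Int × Int) :=
  let cs := code.toList
  if PySem.Chars.strip cs = [] then []
  else
    let raw := ["SOF".toList] ++ (PySem.Chars.splitOn cs ['\n']).map (fun l => "    ".toList ++ l) ++ ["EOF".toList]
    let d := bIndents (-1) raw
    let blocks := (bScan 0 1 (d.drop 1)).2  -- line 0 is the SOF sentinel; its block is never emitted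
    match PySem.Chars.splitOn cs ['\n'] with
    | [] => []  -- unreachable: split always returns at least one piece
    | first :: rest =>
      bRanges (bEndLoop [PySem.Chars.len first] (PySem.Chars.len first) rest) blocks

-- ===== PRECONDITION & SPEC =====
def Spec_parse_indent_blocks (code : String) (out : List (Int × Int)) : Prop := out = parse_indent_blocks_alt code
instance (code : String) (out : List (Int × Int)) : Decidable (Spec_parse_indent_blocks code out) := by unfold Spec_parse_indent_blocks; infer_instance

-- ===== CLAIM (what is proved, stated in full; the proofs are below) =====
def Claim_equal_parse_indent_blocks : Prop := ∀ (code : String), Dom_parse_indent_blocks code → Spec_parse_indent_blocks code (parse_indent_blocks code)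

-- ===== LEMMAS AND PROOFS =====

-- basic facts about strip / bLineIndent ------------------------------------

lemma stripLength_le (cs : List Char) : (PySem.Chars.strip cs).length ≤ cs.length := by
  simp [PySem.Chars.strip, PySem.Chars.rstrip, PySem.Chars.lstrip]
  calc (List.dropWhile PySem.Chars.isspace (List.dropWhile PySem.Chars.isspace cs).reverse).length
      ≤ (List.dropWhile PySem.Chars.isspace cs).reverse.length := List.length_dropWhile_le _ _
    _ ≤ cs.length := by simpa using List.length_dropWhile_le PySem.Chars.isspace cs

lemma stripLen_le (cs : List Char) : PySem.Chars.len (PySem.Chars.strip cs) ≤ PySem.Chars.len cs := by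
  simp only [PySem.Chars.len_eq]
  exact_mod_cast stripLength_le cs

lemma bLineIndent_nonneg (prev : Int) (line : List Char) (h : 0 ≤ prev) : 0 ≤ bLineIndent prev line := by
  unfold bLineIndent; split
  · exact h
  · have := stripLen_le line; omega

lemma bLineIndent_nonblank (line : List Char) (p q : Int) (h : PySem.Chars.strip line ≠ []) :
    bLineIndent p line = bLineIndent q line := by simp [bLineIndent, h]

lemma bLineIndent_EOF (l : Int) : bLineIndent l ("EOF".toList) = 0 := by
  unfold bLineIndent; rw [if_neg (by decide)]; decide

-- bIndents ------------------------------------------------------------------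

lemma bIndents_nonneg (prev : Int) (lines : List (List Char)) (h : 0 ≤ prev) :
    ∀ y ∈ bIndents prev lines, 0 ≤ y := by
  induction lines generalizing prev with
  | nil => simp [bIndents]
  | cons line rest ih =>
    intro y hy
    rcases List.mem_cons.mp hy with h1 | h1
    · exact h1 ▸ bLineIndent_nonneg prev line h
    · exact ih (bLineIndent prev line) (bLineIndent_nonneg prev line h) y h1

lemma bIndents_last_EOF (prev : Int) (lines : List (List Char))
    (h : lines.getLast? = some ("EOF".toList)) :
    (bIndents prev lines).getLast? = some 0 := by
  induction lines generalizing prev with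
  | nil => simp at h
  | cons line rest ih =>
    cases rest with
    | nil =>
      have hline : line = "EOF".toList := by simpa using h
      subst hline
      simp [bIndents]
      exact bLineIndent_EOF prev
    | cons b t =>
      have h' : (b :: t).getLast? = some ("EOF".toList) := by
        rwa [List.getLast?_cons_cons] at h
      have := ih (bLineIndent prev line) h'
      show (bLineIndent prev line :: bIndents (bLineIndent prev line) (b :: t)).getLast? = some 0
      rw [show bIndents (bLineIndent prev line) (b :: t)
            = bLineIndent (bLineIndent prev line) b
              :: bIndents (bLineIndent (bLineIndent prev line) b) t from rfl,
          List.getLast?_cons_cons]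
      rw [show bIndents (bLineIndent prev line) (b :: t)
            = bLineIndent (bLineIndent prev line) b
              :: bIndents (bLineIndent (bLineIndent prev line) b) t from rfl] at this
      exact this

-- bScan: bounds, guaranteed closing, and full consumption at level ≤ 0 ------

theorem bScan_ge (lvl i : Int) (ds : List Int) : i ≤ (bScan lvl i ds).1 := by
  match ds with
  | [] => simp [bScan]
  | x :: rest =>
    rw [bScan]
    by_cases h1 : x < lvl
    · simp [h1]
    · by_cases h2 : x > lvl
      · rw [if_neg h1, if_pos h2]
        have g1 := bScan_ge x (i+1) rest
        have g2 := bScan_ge lvl (bScan x (i+1) rest).1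
          (rest.drop ((bScan x (i+1) rest).1 - (i+1)).toNat)
        simp only []
        omega
      · rw [if_neg h1, if_neg h2]
        have := bScan_ge lvl (i+1) rest
        omega
termination_by ds.length
decreasing_by all_goals (simp [List.length_drop]; try omega)

theorem bScan_le (lvl i : Int) (ds : List Int) : (bScan lvl i ds).1 ≤ i + ds.length := by
  match ds with
  | [] => simp [bScan]
  | x :: rest =>
    rw [bScan]
    by_cases h1 : x < lvl
    · simp [h1]; push_cast; omega
    · by_cases h2 : x > lvl
      · rw [if_neg h1, if_pos h2]
        have g1 := bScan_ge x (i+1) rest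
        have l1 := bScan_le x (i+1) rest
        have l2 := bScan_le lvl (bScan x (i+1) rest).1
          (rest.drop ((bScan x (i+1) rest).1 - (i+1)).toNat)
        rw [List.length_drop] at l2
        simp only []
        simp only [List.length_cons]
        push_cast
        omega
      · rw [if_neg h1, if_neg h2]
        have := bScan_le lvl (i+1) rest
        simp only [List.length_cons]
        push_cast
        omega
termination_by ds.length
decreasing_by all_goals (simp [List.length_drop]; try omega)

theorem bScan_closes (lvl i : Int) (ds : List Int) (h1 : 1 ≤ lvl) (h2 : ds.getLast? = some 0) :
    (bScan lvl i ds).1 < i + ds.length := by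
  match ds with
  | [] => simp at h2
  | x :: rest =>
    rw [bScan]
    by_cases hx : x < lvl
    · simp only [if_pos hx, List.length_cons]
      push_cast; omega
    · have hxge : lvl ≤ x := not_lt.mp hx
      have hrestne : rest ≠ [] := by
        intro hr; subst hr; simp at h2; omega
      have hrest : rest.getLast? = some 0 := by
        cases rest with
        | nil => exact absurd rfl hrestne
        | cons b t => rwa [List.getLast?_cons_cons] at h2
      by_cases h2' : x > lvl
      · rw [if_neg hx, if_pos h2']
        have ge1 := bScan_ge x (i+1) rest
        have c1 := bScan_closes x (i+1) rest (by omega) hrest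
        have hn : ((bScan x (i+1) rest).1 - (i+1)).toNat < rest.length := by omega
        have hlast2 : (rest.drop ((bScan x (i+1) rest).1 - (i+1)).toNat).getLast? = some 0 := by
          rw [List.getLast?_drop, if_neg (by omega)]; exact hrest
        have c2 := bScan_closes lvl (bScan x (i+1) rest).1
          (rest.drop ((bScan x (i+1) rest).1 - (i+1)).toNat) h1 hlast2
        rw [List.length_drop] at c2
        simp only [List.length_cons]
        push_cast
        omega
      · rw [if_neg hx, if_neg h2']
        have := bScan_closes lvl (i+1) rest h1 hrest
        simp only [List.length_cons]
        push_cast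
        omega
termination_by ds.length
decreasing_by all_goals (simp [List.length_drop]; try omega)

theorem bScan_total (lvl i : Int) (ds : List Int) (h1 : lvl ≤ 0) (h2 : ∀ y ∈ ds, 0 ≤ y) :
    (bScan lvl i ds).1 = i + ds.length := by
  match ds with
  | [] => simp [bScan]
  | x :: rest =>
    have hx0 : 0 ≤ x := h2 x (by simp)
    have hrest : ∀ y ∈ rest, 0 ≤ y := fun y hy => h2 y (by simp [hy])
    rw [bScan]
    rw [if_neg (by omega)]
    by_cases h2' : x > lvl
    · rw [if_pos h2']
      have ge1 := bScan_ge x (i+1) rest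
      have le1 := bScan_le x (i+1) rest
      have t2 := bScan_total lvl (bScan x (i+1) rest).1
        (rest.drop ((bScan x (i+1) rest).1 - (i+1)).toNat) h1
        (fun y hy => hrest y (List.mem_of_mem_drop hy))
      rw [List.length_drop] at t2
      simp only [List.length_cons]
      push_cast
      omega
    · rw [if_neg h2']
      have := bScan_total lvl (i+1) rest h1 hrest
      simp only [List.length_cons]
      push_cast
      omega
termination_by ds.length
decreasing_by all_goals (simp [List.length_drop]; try omega)

-- sStack: A's stack contents, read off against B's recursive descent --------

def sStack : List (Int × Int) → Int → List Int → List (Int × Int)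
  | [], _, _ => []
  | (l, s) :: S, i, ds =>
    if ((bScan l i ds).1 - i).toNat < ds.length then
      (bScan l i ds).2 ++ [(s - 1, (bScan l i ds).1 - 1)]
        ++ sStack S (bScan l i ds).1 (ds.drop ((bScan l i ds).1 - i).toNat)
    else (bScan l i ds).2

lemma sStack_pop (l s l₂ s₂ : Int) (S : List (Int × Int)) (i x : Int) (ds : List Int)
    (hx : x < l) :
    sStack ((l, s) :: (l₂, s₂) :: S) i (x :: ds)
      = (s - 1, i - 1) :: sStack ((l₂, s₂) :: S) i (x :: ds) := by
  have hb : bScan l i (x :: ds) = (i, []) := by rw [bScan, if_pos hx]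
  rw [show sStack ((l, s) :: (l₂, s₂) :: S) i (x :: ds)
      = if ((bScan l i (x :: ds)).1 - i).toNat < (x :: ds).length then
          (bScan l i (x :: ds)).2 ++ [(s - 1, (bScan l i (x :: ds)).1 - 1)]
            ++ sStack ((l₂, s₂) :: S) (bScan l i (x :: ds)).1
                ((x :: ds).drop ((bScan l i (x :: ds)).1 - i).toNat)
        else (bScan l i (x :: ds)).2 from rfl, hb]
  simp

lemma sStack_eq_top (l s : Int) (S : List (Int × Int)) (i : Int) (ds : List Int) :
    sStack ((l, s) :: S) i (l :: ds) = sStack ((l, s) :: S) (i + 1) ds := by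
  have hb : bScan l i (l :: ds) = bScan l (i + 1) ds := by
    rw [bScan, if_neg (by omega), if_neg (by omega)]
  have hge := bScan_ge l (i + 1) ds
  have hle := bScan_le l (i + 1) ds
  rw [show sStack ((l, s) :: S) i (l :: ds)
      = if ((bScan l i (l :: ds)).1 - i).toNat < (l :: ds).length then
          (bScan l i (l :: ds)).2 ++ [(s - 1, (bScan l i (l :: ds)).1 - 1)]
            ++ sStack S (bScan l i (l :: ds)).1 ((l :: ds).drop ((bScan l i (l :: ds)).1 - i).toNat)
        else (bScan l i (l :: ds)).2 from rfl, hb]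
  rw [show sStack ((l, s) :: S) (i + 1) ds
      = if ((bScan l (i + 1) ds).1 - (i + 1)).toNat < ds.length then
          (bScan l (i + 1) ds).2 ++ [(s - 1, (bScan l (i + 1) ds).1 - 1)]
            ++ sStack S (bScan l (i + 1) ds).1 (ds.drop ((bScan l (i + 1) ds).1 - (i + 1)).toNat)
        else (bScan l (i + 1) ds).2 from rfl]
  have htest : (((bScan l (i + 1) ds).1 - i).toNat < (l :: ds).length)
      ↔ (((bScan l (i + 1) ds).1 - (i + 1)).toNat < ds.length) := by
    simp only [List.length_cons]; omega
  by_cases hc : ((bScan l (i + 1) ds).1 - (i + 1)).toNat < ds.length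
  · rw [if_pos (htest.mpr hc), if_pos hc]
    have hdrop : (l :: ds).drop ((bScan l (i + 1) ds).1 - i).toNat
        = ds.drop ((bScan l (i + 1) ds).1 - (i + 1)).toNat := by
      rw [show ((bScan l (i + 1) ds).1 - i).toNat
          = ((bScan l (i + 1) ds).1 - (i + 1)).toNat + 1 from by omega]
      rfl
    rw [hdrop]
  · rw [if_neg (fun hcc => hc (htest.mp hcc)), if_neg hc]

lemma sStack_push (l s x i : Int) (S : List (Int × Int)) (ds : List Int)
    (hx : l < x) (hl : 0 ≤ l) (hlast : ds.getLast? = some 0) :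
    sStack ((l, s) :: S) i (x :: ds) = sStack ((x, i) :: (l, s) :: S) (i + 1) ds := by
  obtain ⟨j, sub, hr1⟩ : ∃ j sub, bScan x (i + 1) ds = (j, sub) := ⟨_, _, rfl⟩
  have hge1 : i + 1 ≤ j := by have := bScan_ge x (i + 1) ds; rw [hr1] at this; exact this
  have hcl : j < (i + 1) + ds.length := by
    have := bScan_closes x (i + 1) ds (by omega) hlast; rw [hr1] at this; exact this
  have hnlt : (j - (i + 1)).toNat < ds.length := by omega
  obtain ⟨k, out2, hr2⟩ : ∃ k out2, bScan l j (ds.drop (j - (i + 1)).toNat) = (k, out2) :=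
    ⟨_, _, rfl⟩
  have hge2 : j ≤ k := by
    have := bScan_ge l j (ds.drop (j - (i + 1)).toNat); rw [hr2] at this; exact this
  have hle2 : k ≤ j + (ds.length - (j - (i + 1)).toNat) := by
    have := bScan_le l j (ds.drop (j - (i + 1)).toNat); rw [hr2, List.length_drop] at this
    push_cast at this ⊢; omega
  have hbl : bScan l i (x :: ds) = (k, sub ++ [(i - 1, j - 1)] ++ out2) := by
    rw [bScan, if_neg (by omega), if_pos (by omega), hr1]
    simp only []
    rw [hr2]
  -- unfold the outer sStack on the left
  rw [show sStack ((l, s) :: S) i (x :: ds)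
      = if ((bScan l i (x :: ds)).1 - i).toNat < (x :: ds).length then
          (bScan l i (x :: ds)).2 ++ [(s - 1, (bScan l i (x :: ds)).1 - 1)]
            ++ sStack S (bScan l i (x :: ds)).1 ((x :: ds).drop ((bScan l i (x :: ds)).1 - i).toNat)
        else (bScan l i (x :: ds)).2 from rfl, hbl]
  -- unfold the outer sStack on the right (its head block (x, i) closes at j)
  rw [show sStack ((x, i) :: (l, s) :: S) (i + 1) ds
      = if ((bScan x (i + 1) ds).1 - (i + 1)).toNat < ds.length then
          (bScan x (i + 1) ds).2 ++ [(i - 1, (bScan x (i + 1) ds).1 - 1)]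
            ++ sStack ((l, s) :: S) (bScan x (i + 1) ds).1
                (ds.drop ((bScan x (i + 1) ds).1 - (i + 1)).toNat)
        else (bScan x (i + 1) ds).2 from rfl, hr1]
  simp only []
  rw [if_pos hnlt]
  -- unfold the inner sStack on the right
  rw [show sStack ((l, s) :: S) j (ds.drop (j - (i + 1)).toNat)
      = if ((bScan l j (ds.drop (j - (i + 1)).toNat)).1 - j).toNat
            < (ds.drop (j - (i + 1)).toNat).length then
          (bScan l j (ds.drop (j - (i + 1)).toNat)).2
            ++ [(s - 1, (bScan l j (ds.drop (j - (i + 1)).toNat)).1 - 1)]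
            ++ sStack S (bScan l j (ds.drop (j - (i + 1)).toNat)).1
                ((ds.drop (j - (i + 1)).toNat).drop
                  ((bScan l j (ds.drop (j - (i + 1)).toNat)).1 - j).toNat)
        else (bScan l j (ds.drop (j - (i + 1)).toNat)).2 from rfl, hr2]
  simp only []
  have htest : ((k - i).toNat < (x :: ds).length)
      ↔ ((k - j).toNat < (ds.drop (j - (i + 1)).toNat).length) := by
    rw [List.length_drop]; simp only [List.length_cons]; omega
  have hdrop : (x :: ds).drop (k - i).toNat
      = (ds.drop (j - (i + 1)).toNat).drop (k - j).toNat := by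
    rw [List.drop_drop,
        show (j - (i + 1)).toNat + (k - j).toNat = (k - (i + 1)).toNat from by omega,
        show (k - i).toNat = (k - (i + 1)).toNat + 1 from by omega]
    rfl
  by_cases hc : (k - j).toNat < (ds.drop (j - (i + 1)).toNat).length
  · rw [if_pos (htest.mpr hc), if_pos hc, hdrop]
    simp [List.append_assoc]
  · rw [if_neg (fun hcc => hc (htest.mp hcc)), if_neg hc]

-- A's loop, one step at a time ----------------------------------------------

lemma aPopWhile_stop (indent i l s : Int) (L S : List Int) (res : List (Int × Int))
    (h : ¬ indent < l) : aPopWhile indent i (l :: L) (s :: S) res = (l :: L, s :: S, res) := by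
  rw [aPopWhile, if_neg h]

lemma aPopWhile_go (indent i l s : Int) (L S : List Int) (res : List (Int × Int))
    (h : indent < l) :
    aPopWhile indent i (l :: L) (s :: S) res = aPopWhile indent i L S (res ++ [(s - 1, i - 1)]) := by
  rw [aPopWhile, if_pos h]

lemma aStep_indent (line : List Char) (l : Int) (K : List Int) :
    (if PySem.Chars.strip line = [] then (l :: K).headD 0
     else PySem.Chars.len line - PySem.Chars.len (PySem.Chars.strip line)) = bLineIndent l line := by
  unfold bLineIndent; split <;> simp

lemma aStep_eq_case (i : Int) (line : List Char) (l s : Int) (K S : List Int)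
    (res : List (Int × Int)) (h : bLineIndent l line = l) :
    aStep i line (l :: K, s :: S, res) = (l :: K, s :: S, res) := by
  simp only [aStep, aStep_indent]
  rw [aPopWhile_stop (bLineIndent l line) i l s K S res (by omega)]
  simp only [List.headD_cons]
  split_ifs with hg
  · exfalso; omega
  · rfl

lemma aStep_push_case (i : Int) (line : List Char) (l s : Int) (K S : List Int)
    (res : List (Int × Int)) (h : l < bLineIndent l line) :
    aStep i line (l :: K, s :: S, res) = (bLineIndent l line :: l :: K, i :: s :: S, res) := by
  simp only [aStep, aStep_indent]
  rw [aPopWhile_stop (bLineIndent l line) i l s K S res (by omega)]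
  simp only [List.headD_cons]
  split_ifs with hg
  · rfl
  · exfalso; omega

lemma aStep_pop_case (i : Int) (line : List Char) (l s l₂ s₂ : Int) (K S : List Int)
    (res : List (Int × Int)) (h : bLineIndent l line < l)
    (hnb : PySem.Chars.strip line ≠ []) :
    aStep i line (l :: l₂ :: K, s :: s₂ :: S, res)
      = aStep i line (l₂ :: K, s₂ :: S, res ++ [(s - 1, i - 1)]) := by
  simp only [aStep, aStep_indent]
  rw [bLineIndent_nonblank line l₂ l hnb]
  rw [aPopWhile_go _ _ _ _ _ _ _ h]

-- the main invariant: A's loop from any reachable state is sStack ------------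

theorem mainLoop (lines : List (List Char)) (l s : Int) (P : List (Int × Int))
    (res : List (Int × Int)) (i : Int)
    (hl : 0 ≤ l) (hP : ∀ p ∈ P, 0 ≤ p.1)
    (h0 : ∃ q, ((l, s) :: P).getLast? = some q ∧ q.1 = 0)
    (hE : lines.getLast? = some ("EOF".toList) ∨ lines = []) :
    (aLoop i lines (l :: (P.map Prod.fst ++ [-1]), s :: (P.map Prod.snd ++ [-1]), res)).2.2
      = res ++ sStack ((l, s) :: P) i (bIndents l lines) := by
  match lines, P with
  | [], P =>
    simp [aLoop, bIndents, sStack, bScan]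
  | line :: rest, P =>
    rcases lt_trichotomy (bLineIndent l line) l with hx | hx | hx
    · -- pop: the top block closes at this line
      have hnb : PySem.Chars.strip line ≠ [] := by
        intro hb; rw [show bLineIndent l line = l from by simp [bLineIndent, hb]] at hx; omega
      have hx0 : 0 ≤ bLineIndent l line := by
        unfold bLineIndent; rw [if_neg hnb]; have := stripLen_le line; omega
      match P with
      | [] =>
        exfalso
        obtain ⟨⟨qa, qb⟩, hq, hq0⟩ := h0
        simp at hq hq0
        omega
      | (l₂, s₂) :: P' =>
        have hl₂ : 0 ≤ l₂ := hP (l₂, s₂) (by simp)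
        have h0' : ∃ q, ((l₂, s₂) :: P').getLast? = some q ∧ q.1 = 0 := by
          obtain ⟨q, hq, hq0⟩ := h0
          exact ⟨q, by rwa [List.getLast?_cons_cons] at hq, hq0⟩
        have hstep : aLoop i (line :: rest)
            (l :: (((l₂, s₂) :: P').map Prod.fst ++ [-1]),
             s :: (((l₂, s₂) :: P').map Prod.snd ++ [-1]), res)
            = aLoop i (line :: rest)
              (l₂ :: (P'.map Prod.fst ++ [-1]), s₂ :: (P'.map Prod.snd ++ [-1]),
               res ++ [(s - 1, i - 1)]) := by
          rw [aLoop, aLoop]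
          rw [show (l :: (((l₂, s₂) :: P').map Prod.fst ++ [-1]),
                    s :: (((l₂, s₂) :: P').map Prod.snd ++ [-1]), res)
              = (l :: l₂ :: (P'.map Prod.fst ++ [-1]), s :: s₂ :: (P'.map Prod.snd ++ [-1]), res)
              from by simp]
          rw [aStep_pop_case i line l s l₂ s₂ (P'.map Prod.fst ++ [-1])
            (P'.map Prod.snd ++ [-1]) res hx hnb]
        rw [hstep]
        rw [mainLoop (line :: rest) l₂ s₂ P' (res ++ [(s - 1, i - 1)]) i hl₂
          (fun p hp => hP p (by simp [hp])) h0' hE]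
        have hind : bIndents l₂ (line :: rest) = bIndents l (line :: rest) := by
          show bLineIndent l₂ line :: bIndents (bLineIndent l₂ line) rest
            = bLineIndent l line :: bIndents (bLineIndent l line) rest
          rw [bLineIndent_nonblank line l₂ l hnb]
        rw [hind]
        rw [show bIndents l (line :: rest)
            = bLineIndent l line :: bIndents (bLineIndent l line) rest from rfl]
        rw [sStack_pop l s l₂ s₂ P' i (bLineIndent l line) _ hx]
        simp
    · -- equal: the line stays in the current block
      have hE' : rest.getLast? = some ("EOF".toList) ∨ rest = [] := by
        cases rest with
        | nil => exact Or.inr rfl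
        | cons b t =>
          rcases hE with hE | hE
          · exact Or.inl (by rwa [List.getLast?_cons_cons] at hE)
          · simp at hE
      have hstep : aLoop i (line :: rest)
          (l :: (P.map Prod.fst ++ [-1]), s :: (P.map Prod.snd ++ [-1]), res)
          = aLoop (i + 1) rest
            (l :: (P.map Prod.fst ++ [-1]), s :: (P.map Prod.snd ++ [-1]), res) := by
        rw [aLoop, aStep_eq_case i line l s (P.map Prod.fst ++ [-1])
          (P.map Prod.snd ++ [-1]) res hx]
      rw [hstep]
      rw [mainLoop rest l s P res (i + 1) hl hP h0 hE']
      rw [show bIndents l (line :: rest)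
          = bLineIndent l line :: bIndents (bLineIndent l line) rest from rfl, hx]
      rw [sStack_eq_top l s P i (bIndents l rest)]
    · -- push: a deeper block opens at this line
      have hx1 : 1 ≤ bLineIndent l line := by omega
      have hrestne : rest ≠ [] := by
        intro hr; subst hr
        rcases hE with hE | hE
        · have : line = "EOF".toList := by simpa using hE
          rw [this, bLineIndent_EOF] at hx1; omega
        · simp at hE
      have hEr : rest.getLast? = some ("EOF".toList) := by
        cases rest with
        | nil => exact absurd rfl hrestne
        | cons b t =>
          rcases hE with hE | hE
          · rwa [List.getLast?_cons_cons] at hE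
          · simp at hE
      have hlast : (bIndents (bLineIndent l line) rest).getLast? = some 0 :=
        bIndents_last_EOF (bLineIndent l line) rest hEr
      have hstep : aLoop i (line :: rest)
          (l :: (P.map Prod.fst ++ [-1]), s :: (P.map Prod.snd ++ [-1]), res)
          = aLoop (i + 1) rest
            (bLineIndent l line :: (((l, s) :: P).map Prod.fst ++ [-1]),
             i :: (((l, s) :: P).map Prod.snd ++ [-1]), res) := by
        rw [aLoop, aStep_push_case i line l s (P.map Prod.fst ++ [-1])
          (P.map Prod.snd ++ [-1]) res hx]
        simp
      rw [hstep]
      rw [mainLoop rest (bLineIndent l line) i ((l, s) :: P) res (i + 1) (by omega)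
        (by intro p hp; rcases List.mem_cons.mp hp with h | h
            · rw [h]; exact hl
            · exact hP p h)
        (by obtain ⟨⟨qa, qb⟩, hq, hq0⟩ := h0
            simp at hq0
            cases P with
            | nil =>
              refine ⟨(l, s), by simp, ?_⟩
              simp at hq
              show l = 0
              omega
            | cons p P'' => exact ⟨(qa, qb), by rwa [List.getLast?_cons_cons], by simpa using hq0⟩)
        (Or.inl hEr)]
      rw [show bIndents l (line :: rest)
          = bLineIndent l line :: bIndents (bLineIndent l line) rest from rfl]
      rw [sStack_push l s (bLineIndent l line) i P (bIndents (bLineIndent l line) rest) hx hl hlast]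
termination_by (lines.length, P.length)

-- the identical second phases coincide --------------------------------------

lemma endAB (lines : List (List Char)) (acc : List Int) (last : Int) :
    aEndLoop acc last lines = bEndLoop acc last lines := by
  induction lines generalizing acc last with
  | nil => simp [aEndLoop, bEndLoop]
  | cons l t ih => simp [aEndLoop, bEndLoop, ih]

lemma rangesAB (le : List Int) (xs : List (Int × Int)) : aRanges le xs = bRanges le xs := by
  induction xs with
  | nil => simp [aRanges, bRanges]
  | cons p t ih => obtain ⟨a, b⟩ := p; simp [aRanges, bRanges, ih]

-- assembling the whole functions ---------------------------------------------

lemma blocks_agree (mapped : List (List Char)) :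
    (aLoop 0 (["SOF".toList] ++ mapped ++ ["EOF".toList]) ([-1], [-1], [])).2.2
      = (bScan 0 1 ((bIndents (-1) (["SOF".toList] ++ mapped ++ ["EOF".toList])).drop 1)).2 := by
  have hsof : aStep 0 ("SOF".toList) ([-1], [-1], []) = ([0, -1], [0, -1], []) := by decide
  have h1 : aLoop 0 (["SOF".toList] ++ mapped ++ ["EOF".toList]) ([-1], [-1], [])
      = aLoop 1 (mapped ++ ["EOF".toList]) ([0, -1], [0, -1], []) := by
    rw [show ["SOF".toList] ++ mapped ++ ["EOF".toList]
        = "SOF".toList :: (mapped ++ ["EOF".toList]) from by simp]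
    rw [aLoop, hsof]
    norm_num
  have h2 := mainLoop (mapped ++ ["EOF".toList]) 0 0 [] [] 1 le_rfl (by simp)
    ⟨(0, 0), by simp, rfl⟩ (Or.inl List.getLast?_concat)
  simp only [List.map_nil, List.nil_append] at h2
  have hnn : ∀ y ∈ bIndents 0 (mapped ++ ["EOF".toList]), 0 ≤ y :=
    bIndents_nonneg 0 _ le_rfl
  have ht := bScan_total 0 1 (bIndents 0 (mapped ++ ["EOF".toList])) le_rfl hnn
  have hst : sStack [(0, 0)] 1 (bIndents 0 (mapped ++ ["EOF".toList]))
      = (bScan 0 1 (bIndents 0 (mapped ++ ["EOF".toList]))).2 := by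
    rw [show sStack [(0, 0)] 1 (bIndents 0 (mapped ++ ["EOF".toList]))
        = if ((bScan 0 1 (bIndents 0 (mapped ++ ["EOF".toList]))).1 - 1).toNat
              < (bIndents 0 (mapped ++ ["EOF".toList])).length then
            (bScan 0 1 (bIndents 0 (mapped ++ ["EOF".toList]))).2
              ++ [(0 - 1, (bScan 0 1 (bIndents 0 (mapped ++ ["EOF".toList]))).1 - 1)]
              ++ sStack [] (bScan 0 1 (bIndents 0 (mapped ++ ["EOF".toList]))).1
                  ((bIndents 0 (mapped ++ ["EOF".toList])).drop
                    ((bScan 0 1 (bIndents 0 (mapped ++ ["EOF".toList]))).1 - 1).toNat)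
          else (bScan 0 1 (bIndents 0 (mapped ++ ["EOF".toList]))).2 from rfl]
    rw [if_neg (by rw [ht]; omega)]
  have hdrop : (bIndents (-1) (["SOF".toList] ++ mapped ++ ["EOF".toList])).drop 1
      = bIndents 0 (mapped ++ ["EOF".toList]) := by
    rw [show ["SOF".toList] ++ mapped ++ ["EOF".toList]
        = "SOF".toList :: (mapped ++ ["EOF".toList]) from by simp]
    rw [show bIndents (-1) ("SOF".toList :: (mapped ++ ["EOF".toList]))
        = bLineIndent (-1) ("SOF".toList)
          :: bIndents (bLineIndent (-1) ("SOF".toList)) (mapped ++ ["EOF".toList]) from rfl]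
    rw [show bLineIndent (-1) ("SOF".toList) = 0 from by decide]
    rfl
  rw [h1, h2, hst, hdrop]

-- ===== VERDICT (by name: the statement is the Claim_ definition above) =====
theorem parse_indent_blocks_spec : Claim_equal_parse_indent_blocks := by
  unfold Claim_equal_parse_indent_blocks
  intro code _
  unfold Spec_parse_indent_blocks parse_indent_blocks parse_indent_blocks_alt
  by_cases h : PySem.Chars.strip code.toList = []
  · simp [h]
  · simp only [if_neg h]
    cases hsp : PySem.Chars.splitOn code.toList ['\n'] with
    | nil => simp
    | cons first rest =>
      show aRanges (aEndLoop [PySem.Chars.len first] (PySem.Chars.len first) rest)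
            (aLoop 0 (["SOF".toList] ++ List.map (fun l => "    ".toList ++ l) (first :: rest)
              ++ ["EOF".toList]) ([-1], [-1], [])).2.2
          = bRanges (bEndLoop [PySem.Chars.len first] (PySem.Chars.len first) rest)
            (bScan 0 1 ((bIndents (-1) (["SOF".toList]
              ++ List.map (fun l => "    ".toList ++ l) (first :: rest) ++ ["EOF".toList])).drop 1)).2
      rw [rangesAB, endAB,
        blocks_agree (List.map (fun l => "    ".toList ++ l) (first :: rest))]
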